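-- pv_equiv track=rewrite | github.com/truesteele/contacts | scripts/intelligence/newsletter_voices.py | count_philanthropy_post_keywords
-- ===== SOURCE A (Python) =====
-- PHILANTHROPY_POST_KEYWORDS = [
--     "philanthrop", "grantmak", "nonprofit", "non-profit", "foundation",
--     "giving", "donor", "charitable", "social impact", "impact invest",
--     "social enterprise", "community development", "capacity build",
--     "equity", "justice", "mutual aid", "grassroots",
--     "endowment", "cdfi", "microfinance", "blended finance",
--     "social sector", "civil society", "public interest",
--     "humanitarian", "social good", "social change",
--     "fundrais", "grant", "program officer",
--     "collective impact", "systems change", "theory of change",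
--     "racial equity", "economic mobility", "wealth gap",
--     "trust-based", "participatory", "community-led",
--     "impact measurement", "social return", "outcomes",
--     "poverty", "food insecurity", "housing insecurity",
--     "climate justice", "environmental justice",
--     "human rights", "civic engagement", "democracy",
--     "DEI", "diversity", "inclusion", "belonging",
-- ]
--
-- def count_philanthropy_post_keywords(posts):
--     """Count how many philanthropy keywords appear across a contact's posts."""
--     total_hits = 0
--     keyword_set = set()
--     for post in posts:
--         content = (post.get("post_content") or "").lower()
--         for kw in PHILANTHROPY_POST_KEYWORDS:
--             if kw.lower() in content:
--                 total_hits += 1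
--                 keyword_set.add(kw)
--     return total_hits, keyword_set
-- ===== SOURCE B (Python) =====
-- PHILANTHROPY_POST_KEYWORDS = [
--     "philanthrop", "grantmak", "nonprofit", "non-profit", "foundation",
--     "giving", "donor", "charitable", "social impact", "impact invest",
--     "social enterprise", "community development", "capacity build",
--     "equity", "justice", "mutual aid", "grassroots",
--     "endowment", "cdfi", "microfinance", "blended finance",
--     "social sector", "civil society", "public interest",
--     "humanitarian", "social good", "social change",
--     "fundrais", "grant", "program officer",
--     "collective impact", "systems change", "theory of change",
--     "racial equity", "economic mobility", "wealth gap",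
--     "trust-based", "participatory", "community-led",
--     "impact measurement", "social return", "outcomes",
--     "poverty", "food insecurity", "housing insecurity",
--     "climate justice", "environmental justice",
--     "human rights", "civic engagement", "democracy",
--     "DEI", "diversity", "inclusion", "belonging",
-- ]
--
-- _LOWERED = [kw.lower() for kw in PHILANTHROPY_POST_KEYWORDS]
-- _LENGTHS = sorted({len(lkw) for lkw in _LOWERED})
--
--
-- def _post_matches(post):
--     """Keywords matched in one post: one gram set, then one O(1) lookup per keyword."""
--     content = (post.get("post_content") or "").lower()
--     n = len(content)
--     grams = {content[i:i + L] for L in _LENGTHS for i in range(n - L + 1)}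
--     return [kw for kw, lkw in zip(PHILANTHROPY_POST_KEYWORDS, _LOWERED) if lkw in grams]
--
--
-- def count_philanthropy_post_keywords(posts):
--     """Count how many philanthropy keywords appear across a contact's posts.
--
--     Instead of one substring scan per keyword per post, build per post a hash
--     set of its substrings at the keyword lengths and answer each keyword by a
--     single set lookup; totals are aggregated over the per-post match lists.
--     """
--     per_post = [_post_matches(post) for post in posts]
--     total_hits = sum(len(m) for m in per_post)
--     keyword_set = set()
--     for m in per_post:
--         keyword_set.update(m)
--     return total_hits, keyword_set
-- ===== Notes on version B (the rewrite author's own statement) =====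
-- stated objective: alternative
-- what changed: Per post, instead of one substring scan per keyword, B builds a single hash set of all of the post's substrings at the (precomputed, lowered) keyword lengths and answers every keyword with one set lookup.
import Mathlib
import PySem

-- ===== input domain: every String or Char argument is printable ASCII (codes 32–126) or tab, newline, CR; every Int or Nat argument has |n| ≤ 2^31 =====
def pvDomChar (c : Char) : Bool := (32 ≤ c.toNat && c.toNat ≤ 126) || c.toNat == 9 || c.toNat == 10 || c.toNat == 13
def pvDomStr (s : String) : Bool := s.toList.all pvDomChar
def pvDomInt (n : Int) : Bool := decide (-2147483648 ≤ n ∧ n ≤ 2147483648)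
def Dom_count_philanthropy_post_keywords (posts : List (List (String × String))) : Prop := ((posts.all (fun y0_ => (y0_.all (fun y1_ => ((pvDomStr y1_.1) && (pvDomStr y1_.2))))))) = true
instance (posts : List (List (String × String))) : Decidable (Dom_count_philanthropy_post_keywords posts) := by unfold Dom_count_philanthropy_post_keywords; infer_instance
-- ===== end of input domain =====

-- ===== PORT A =====
-- B replaces the 54 per-keyword substring scans per post by one hash set of the post's
-- substrings at the keyword lengths, answered by set lookups (objective: alternative).
def PHILANTHROPY_POST_KEYWORDS : List String :=
  ["philanthrop",
    "grantmak",
    "nonprofit",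
    "non-profit",
    "foundation",
    "giving",
    "donor",
    "charitable",
    "social impact",
    "impact invest",
    "social enterprise",
    "community development",
    "capacity build",
    "equity",
    "justice",
    "mutual aid",
    "grassroots",
    "endowment",
    "cdfi",
    "microfinance",
    "blended finance",
    "social sector",
    "civil society",
    "public interest",
    "humanitarian",
    "social good",
    "social change",
    "fundrais",
    "grant",
    "program officer",
    "collective impact",
    "systems change",
    "theory of change",
    "racial equity",
    "economic mobility",
    "wealth gap",
    "trust-based",
    "participatory",
    "community-led",
    "impact measurement",
    "social return",
    "outcomes",
    "poverty",
    "food insecurity",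
    "housing insecurity",
    "climate justice",
    "environmental justice",
    "human rights",
    "civic engagement",
    "democracy",
    "DEI",
    "diversity",
    "inclusion",
    "belonging"]

-- port of A: nested loop, one substring scan per (post, keyword) pair.
-- `post.get("post_content") or ""` is (get?).getD "": get yields an Option String here
-- and the only falsy String is "", on which `or` also yields "".
def count_philanthropy_post_keywords (posts : List (List (String × String))) : Int × List String :=
  posts.foldl (fun acc post =>
    let content := PySem.Str.lower (((PySem.Dict.ofList post).get? "post_content").getD "")
    PHILANTHROPY_POST_KEYWORDS.foldl (fun acc kw =>
      if PySem.Str.isIn (PySem.Str.lower kw) content then (acc.1 + 1, PySem.Set.add acc.2 kw)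
      else acc) acc)
    ((0 : Int), ([] : PySem.Set String))

-- ===== PORT B =====
def pvLowered : List String := PHILANTHROPY_POST_KEYWORDS.map PySem.Str.lower

def pvLengths : List Int :=
  PySem.List.sorted (PySem.Set.ofList (pvLowered.map PySem.Str.len)) (fun x => x) false

-- the set of all substrings of `content` whose length occurs among the keywords
def pvGrams (content : String) : PySem.Set String :=
  pvLengths.foldl (fun g L =>
    (PySem.List.pyRange 0 (PySem.Str.len content - L + 1) 1).foldl
      (fun g i => PySem.Set.add g (PySem.Str.slice content (some i) (some (i + L)))) g)
    PySem.Set.empty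

-- keywords matched in one post: one gram set, then one lookup per keyword
def pvPostMatches (post : List (String × String)) : List String :=
  let content := PySem.Str.lower (((PySem.Dict.ofList post).get? "post_content").getD "")
  let grams := pvGrams content
  ((PHILANTHROPY_POST_KEYWORDS.zip pvLowered).filter
      (fun p => PySem.Set.contains grams p.2)).map (fun p => p.1)

def count_philanthropy_post_keywords_alt (posts : List (List (String × String))) : Int × List String :=
  let perPost := posts.map pvPostMatches
  let totalHits := (perPost.map (fun m => (m.length : Int))).sum
  let keywordSet := perPost.foldl (fun s m => PySem.Set.update s m) ([] : PySem.Set String)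
  (totalHits, keywordSet)

-- ===== PRECONDITION & SPEC =====
def Spec_count_philanthropy_post_keywords (posts : List (List (String × String))) (out : Int × List String) : Prop := out = count_philanthropy_post_keywords_alt posts
instance (posts : List (List (String × String))) (out : Int × List String) : Decidable (Spec_count_philanthropy_post_keywords posts out) := by unfold Spec_count_philanthropy_post_keywords; infer_instance

-- ===== CLAIM (what is proved, stated in full; the proofs are below) =====
def Claim_equal_count_philanthropy_post_keywords : Prop := ∀ (posts : List (List (String × String))), Dom_count_philanthropy_post_keywords posts → Spec_count_philanthropy_post_keywords posts (count_philanthropy_post_keywords posts)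

-- ===== LEMMAS AND PROOFS =====

-- membership in a set built by a nested add-loop
theorem pv_mem_foldl_foldl_add {α β γ : Type} [BEq α] [LawfulBEq α]
    (Ls : List β) (r : β → List γ) (f : β → γ → α) (g : PySem.Set α) (y : α) :
    (y ∈ Ls.foldl (fun g L => (r L).foldl (fun g i => PySem.Set.add g (f L i)) g) g ↔
      y ∈ g ∨ ∃ L ∈ Ls, ∃ i ∈ r L, y = f L i) := by
  induction Ls generalizing g with
  | nil => simp
  | cons L Ls ih =>
    simp only [List.foldl_cons, ih, PySem.Set.mem_foldl_add, List.mem_cons]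
    constructor
    · rintro ((h | ⟨i, hi, rfl⟩) | ⟨L', hL', i, hi, rfl⟩)
      · exact Or.inl h
      · exact Or.inr ⟨L, Or.inl rfl, i, hi, rfl⟩
      · exact Or.inr ⟨L', Or.inr hL', i, hi, rfl⟩
    · rintro (h | ⟨L', (rfl | hL'), i, hi, rfl⟩)
      · exact Or.inl (Or.inl h)
      · exact Or.inl (Or.inr ⟨i, hi, rfl⟩)
      · exact Or.inr ⟨L', hL', i, hi, rfl⟩

-- every keyword length is at least 1 (pvLengths is a closed literal)
set_option maxRecDepth 8000 in
theorem pv_lengths_pos : ∀ L ∈ pvLengths, 1 ≤ L := by decide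

-- a lowered keyword is in the gram set iff it is a substring of the content
theorem pv_grams_iff (c t : String) (h : PySem.Str.len t ∈ pvLengths) :
    (t ∈ pvGrams c ↔ t.toList <:+: c.toList) := by
  have hlen : PySem.Str.len t = (t.toList.length : Int) := by
    simp [PySem.Str.len]
  unfold pvGrams
  rw [pv_mem_foldl_foldl_add]
  simp only [PySem.Set.empty, List.not_mem_nil, false_or]
  constructor
  · rintro ⟨L, hL, i, hi, rfl⟩
    have hL1 := pv_lengths_pos L hL
    rw [PySem.List.mem_pyRange_one] at hi
    have h0i : 0 ≤ i := hi.1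
    have h0iL : 0 ≤ i + L := by omega
    rw [PySem.Str.toList_slice, PySem.Chars.slice_eq_listSlice,
      PySem.List.slice_toNat _ h0i h0iL]
    exact ((List.take_prefix _ _).isInfix).trans ((List.drop_suffix _ _).isInfix)
  · rintro ⟨pre, suf, hps⟩
    have hc : PySem.Str.len c = (c.toList.length : Int) := by
      simp [PySem.Str.len]
    refine ⟨PySem.Str.len t, h, (pre.length : Int), ?_, ?_⟩
    · rw [PySem.List.mem_pyRange_one]
      have : pre.length + t.toList.length + suf.length = c.toList.length := by
        rw [← hps]; simp; omega
      rw [hc, hlen]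
      omega
    · apply String.toList_inj.mp
      rw [PySem.Str.toList_slice, PySem.Chars.slice_eq_listSlice, hlen]
      rw [PySem.List.slice_toNat _ (by positivity) (by positivity)]
      have h1 : ((pre.length : Int) + (t.toList.length : Int)).toNat - ((pre.length : Int)).toNat
          = t.toList.length := by omega
      rw [h1, Int.toNat_natCast, ← hps]
      rw [List.append_assoc, List.drop_left, List.take_left]

-- for every keyword, the set lookup agrees with A's substring scan
theorem pv_pred_eq (content : String) :
    ∀ kw ∈ PHILANTHROPY_POST_KEYWORDS,
      PySem.Str.isIn (PySem.Str.lower kw) content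
        = PySem.Set.contains (pvGrams content) (PySem.Str.lower kw) := by
  intro kw hkw
  have hmem : PySem.Str.len (PySem.Str.lower kw) ∈ pvLengths := by
    rw [pvLengths, PySem.List.mem_sorted, PySem.Set.mem_ofList]
    exact List.mem_map_of_mem (List.mem_map_of_mem hkw)
  rw [Bool.eq_iff_iff, PySem.Str.isIn_iff_infix, PySem.Set.contains_iff,
    pv_grams_iff content _ hmem]

-- A's inner if-accumulate loop, in closed form
theorem pv_foldl_if (l : List String) (p : String → Bool) (acc : Int × PySem.Set String) :
    l.foldl (fun acc kw => if p kw then (acc.1 + 1, PySem.Set.add acc.2 kw) else acc) acc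
      = (acc.1 + ((l.filter p).length : Int), PySem.Set.update acc.2 (l.filter p)) := by
  induction l generalizing acc with
  | nil => simp [PySem.Set.update_nil]
  | cons x xs ih =>
    by_cases h : p x
    · simp only [List.foldl_cons, h, if_true, ih, List.filter_cons_of_pos h,
        PySem.Set.update_cons, List.length_cons]
      rw [Prod.mk.injEq]
      exact ⟨by push_cast; omega, rfl⟩
    · simp [h, ih, List.filter_cons_of_neg h]

-- B's zip-comprehension is a filter of the keyword list
theorem pv_zip_filter_map (l : List String) (f : String → String) (q : String → Bool) :
    (((l.zip (l.map f)).filter (fun p => q p.2)).map (fun p => p.1))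
      = l.filter (fun x => q (f x)) := by
  induction l with
  | nil => rfl
  | cons x xs ih => by_cases h : q (f x) <;> simp [List.zip_cons_cons, h, ih]

-- A's body for one post equals (count of matches, set update) over B's match list
theorem pv_post_step (post : List (String × String)) (acc : Int × PySem.Set String) :
    (PHILANTHROPY_POST_KEYWORDS.foldl (fun acc kw =>
        if PySem.Str.isIn (PySem.Str.lower kw)
            (PySem.Str.lower (((PySem.Dict.ofList post).get? "post_content").getD "")) then
          (acc.1 + 1, PySem.Set.add acc.2 kw)
        else acc) acc)
      = (acc.1 + ((pvPostMatches post).length : Int),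
         PySem.Set.update acc.2 (pvPostMatches post)) := by
  unfold pvPostMatches
  dsimp only
  rw [pv_foldl_if, show pvLowered = PHILANTHROPY_POST_KEYWORDS.map PySem.Str.lower from rfl,
    pv_zip_filter_map, List.filter_congr (pv_pred_eq _)]

-- A's outer loop in closed form over the per-post match lists
set_option maxRecDepth 8000 in
theorem pv_outer (posts : List (List (String × String))) (acc : Int × PySem.Set String) :
    (posts.foldl (fun acc post =>
        PHILANTHROPY_POST_KEYWORDS.foldl (fun acc kw =>
          if PySem.Str.isIn (PySem.Str.lower kw)
              (PySem.Str.lower (((PySem.Dict.ofList post).get? "post_content").getD "")) then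
            (acc.1 + 1, PySem.Set.add acc.2 kw)
          else acc) acc) acc)
      = (acc.1 + ((posts.map pvPostMatches).map (fun m => (m.length : Int))).sum,
         (posts.map pvPostMatches).foldl (fun s m => PySem.Set.update s m) acc.2) := by
  induction posts generalizing acc with
  | nil => simp
  | cons post posts ih =>
    rw [List.foldl_cons, pv_post_step, ih]
    rw [Prod.mk.injEq]
    constructor
    · rw [List.map_cons, List.map_cons, List.sum_cons, add_assoc]
    · rw [List.map_cons, List.foldl_cons]

-- ===== VERDICT (by name: the statement is the Claim_ definition above) =====
theorem count_philanthropy_post_keywords_spec : Claim_equal_count_philanthropy_post_keywords := by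
  intro posts _
  unfold Spec_count_philanthropy_post_keywords
  unfold count_philanthropy_post_keywords count_philanthropy_post_keywords_alt
  dsimp only
  rw [pv_outer]
  rw [Prod.mk.injEq]
  exact ⟨by omega, rfl⟩
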